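-- pv_equiv track=rewrite | github.com/Schwander1/ai-auto-trade-alpha | scripts/standardize-docs.py | fix_headings
-- ===== SOURCE A (Python) =====
-- def fix_headings(content, is_first_file=False):
--     """Fix heading hierarchy - H1 in first file, H2 in subsequent."""
--     lines = content.split('\n')
--     result = []
--
--     for line in lines:
--         # Convert H1 to H2 if not first file
--         if not is_first_file and line.startswith('# '):
--             line = '## ' + line[2:]
--         result.append(line)
--
--     return '\n'.join(result)
-- ===== SOURCE B (Python) =====
-- def fix_headings(content, is_first_file=False):
--     """Fix heading hierarchy - H1 in first file, H2 in subsequent."""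
--     if is_first_file:
--         return content
--     out = []
--     at_start = True
--     for i, ch in enumerate(content):
--         if at_start and ch == '#' and content[i+1:i+2] == ' ':
--             out.append('#')
--         out.append(ch)
--         at_start = ch == '\n'
--     return ''.join(out)
-- ===== Notes on version B (the rewrite author's own statement) =====
-- stated objective: alternative
-- what changed: B replaces A's split-into-lines / per-line rewrite / rejoin pipeline with a single character-level pass over the whole string that tracks a line-start flag and inserts an extra '#' before each line-initial '# ', never building a line list; it also short-circuits when is_first_file is true.
import Mathlib
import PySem

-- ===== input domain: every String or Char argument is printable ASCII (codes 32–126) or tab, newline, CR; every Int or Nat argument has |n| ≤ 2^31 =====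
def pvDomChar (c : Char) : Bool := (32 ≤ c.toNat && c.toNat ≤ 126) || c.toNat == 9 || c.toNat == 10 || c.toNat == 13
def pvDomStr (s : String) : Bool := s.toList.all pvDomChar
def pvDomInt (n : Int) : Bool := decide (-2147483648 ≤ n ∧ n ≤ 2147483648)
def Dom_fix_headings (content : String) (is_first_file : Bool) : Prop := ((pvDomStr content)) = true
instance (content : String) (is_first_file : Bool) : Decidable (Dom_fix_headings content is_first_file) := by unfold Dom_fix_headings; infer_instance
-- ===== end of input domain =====

-- B replaces A's split/per-line/rejoin pipeline with one character pass tracking a line-start flag; same output, not claimed faster.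

-- ===== PORT A =====
-- literal port of A: split on '\n', loop appending (possibly rewritten) lines, join with '\n'
def fix_headings (content : String) (is_first_file : Bool) : String :=
  let lines := PySem.Chars.splitOn content.toList ['\n']
  let result := lines.foldl (fun acc line =>
    let line := if !is_first_file && PySem.Chars.startswith line ['#', ' ']
                then ['#', '#', ' '] ++ PySem.Chars.slice line (some 2) none
                else line
    acc ++ [line]) []
  String.ofList (PySem.Chars.join ['\n'] result)

-- ===== PORT B =====
-- one pass over the characters; `atStart` is B's at_start flag, `rest.head?` is B's content[i+1:i+2] lookahead
def fixAltGo : List Char → Bool → List Char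
  | [], _ => []
  | c :: rest, atStart =>
    if atStart && c == '#' && rest.head? == some ' '
    then '#' :: c :: fixAltGo rest (c == '\n')
    else c :: fixAltGo rest (c == '\n')

def fix_headings_alt (content : String) (is_first_file : Bool) : String :=
  if is_first_file then content
  else String.ofList (fixAltGo content.toList true)

-- ===== PRECONDITION & SPEC =====
def Spec_fix_headings (content : String) (is_first_file : Bool) (out : String) : Prop := out = fix_headings_alt content is_first_file
instance (content : String) (is_first_file : Bool) (out : String) : Decidable (Spec_fix_headings content is_first_file out) := by unfold Spec_fix_headings; infer_instance

-- ===== CLAIM (what is proved, stated in full; the proofs are below) =====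
def Claim_equal_fix_headings : Prop := ∀ (content : String) (is_first_file : Bool), Dom_fix_headings content is_first_file → Spec_fix_headings content is_first_file (fix_headings content is_first_file)

-- ===== LEMMAS AND PROOFS =====

-- structural characterisation of split-on-'\n': head segment and remaining segments
def spN : List Char → List Char × List (List Char)
  | [] => ([], [])
  | c :: r =>
    let p := spN r
    if c = '\n' then ([], p.1 :: p.2) else (c :: p.1, p.2)

theorem spN_nil : spN [] = ([], []) := rfl

theorem spN_newline (r : List Char) : spN ('\n' :: r) = ([], (spN r).1 :: (spN r).2) := by
  simp [spN]

theorem spN_other (c : Char) (r : List Char) (h : ¬ c = '\n') :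
    spN (c :: r) = (c :: (spN r).1, (spN r).2) := by
  simp [spN, h]

theorem spN_newline_fst (r : List Char) : (spN ('\n' :: r)).1 = [] := by
  rw [spN_newline]

theorem spN_newline_snd (r : List Char) : (spN ('\n' :: r)).2 = (spN r).1 :: (spN r).2 := by
  rw [spN_newline]

theorem spN_other_fst (c : Char) (r : List Char) (h : ¬ c = '\n') :
    (spN (c :: r)).1 = c :: (spN r).1 := by
  rw [spN_other c r h]

theorem spN_other_snd (c : Char) (r : List Char) (h : ¬ c = '\n') :
    (spN (c :: r)).2 = (spN r).2 := by
  rw [spN_other c r h]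

theorem fixAltGo_nil (atStart : Bool) : fixAltGo [] atStart = [] := rfl

theorem fixAltGo_cons (c : Char) (rest : List Char) (atStart : Bool) :
    fixAltGo (c :: rest) atStart
      = if atStart && c == '#' && rest.head? == some ' '
        then '#' :: c :: fixAltGo rest (c == '\n')
        else c :: fixAltGo rest (c == '\n') := rfl

theorem splitOn_go_eq (l cur : List Char) (acc : List (List Char)) (fuel : Nat)
    (h : l.length ≤ fuel) :
    PySem.Chars.splitOn.go ['\n'] fuel l cur acc
      = acc.reverse ++ (cur.reverse ++ (spN l).1) :: (spN l).2 := by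
  induction l generalizing fuel cur acc with
  | nil =>
    rw [PySem.Chars.splitOn.go.eq_def]
    cases fuel <;> simp [spN]
  | cons c rest ih =>
    cases fuel with
    | zero => simp at h
    | succ f =>
      have hf : rest.length ≤ f := by simp at h; omega
      have hstep : PySem.Chars.splitOn.go ['\n'] (f + 1) (c :: rest) cur acc
          = if ['\n'].isPrefixOf (c :: rest) = true
            then PySem.Chars.splitOn.go ['\n'] f (List.drop (['\n'] : List Char).length (c :: rest)) [] (cur.reverse :: acc)
            else PySem.Chars.splitOn.go ['\n'] f rest (c :: cur) acc := rfl
      rw [hstep]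
      by_cases hc : c = '\n'
      · subst hc
        rw [if_pos (by simp [List.isPrefixOf])]
        rw [show List.drop (['\n'] : List Char).length ('\n' :: rest) = rest from rfl]
        rw [ih [] (cur.reverse :: acc) f hf, spN_newline_fst, spN_newline_snd]
        simp
      · rw [if_neg (by simp [List.isPrefixOf]; exact fun hh => hc hh.symm)]
        rw [ih (c :: cur) acc f hf, spN_other_fst c rest hc, spN_other_snd c rest hc]
        simp

theorem splitOn_eq (l : List Char) :
    PySem.Chars.splitOn l ['\n'] = (spN l).1 :: (spN l).2 := by
  show PySem.Chars.splitOn.go ['\n'] (l.length + 1) l [] [] = _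
  rw [splitOn_go_eq _ _ _ _ (by omega)]
  simp

-- A's per-line rewrite, as applied when is_first_file is false
def fA (line : List Char) : List Char :=
  if PySem.Chars.startswith line ['#', ' ']
  then ['#', '#', ' '] ++ PySem.Chars.slice line (some 2) none
  else line

theorem fA_eq (line : List Char) :
    fA line = if ['#', ' '].isPrefixOf line then '#' :: line else line := by
  unfold fA
  simp only [PySem.Chars.startswith]
  by_cases h : List.isPrefixOf ['#', ' '] line
  · obtain ⟨t, rfl⟩ := List.isPrefixOf_iff_prefix.mp h
    simp [PySem.Chars.slice_eq_listSlice, PySem.List.slice]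
  · simp [h]

theorem fA_nil : fA [] = [] := by
  simp [fA_eq, List.isPrefixOf]

theorem spN_fst_head (l : List Char) :
    (spN l).1.head? = some ' ' ↔ l.head? = some ' ' := by
  cases l with
  | nil => simp [spN_nil]
  | cons c r =>
    by_cases hc : c = '\n'
    · subst hc
      rw [spN_newline_fst]
      simp
    · rw [spN_other_fst c r hc]
      simp only [List.head?_cons]

-- the tail part of a '\n'-join
def joinTail : List (List Char) → List Char
  | [] => []
  | y :: ys => '\n' :: PySem.Chars.join ['\n'] (y :: ys)

theorem joinTail_cons (y : List Char) (ys : List (List Char)) :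
    joinTail (y :: ys) = '\n' :: PySem.Chars.join ['\n'] (y :: ys) := rfl

theorem join_eq_joinTail (x : List Char) (t : List (List Char)) :
    PySem.Chars.join ['\n'] (x :: t) = x ++ joinTail t := by
  cases t with
  | nil => simp [PySem.Chars.join_singleton, joinTail]
  | cons y ys => rw [PySem.Chars.join_cons_cons]; simp [joinTail]

theorem join_identity (l : List Char) :
    PySem.Chars.join ['\n'] ((spN l).1 :: (spN l).2) = l := by
  induction l with
  | nil => simp [spN_nil, PySem.Chars.join_singleton]
  | cons c r ih =>
    by_cases hc : c = '\n'
    · subst hc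
      rw [spN_newline_fst, spN_newline_snd, join_eq_joinTail]
      simp [joinTail, ih]
    · rw [spN_other_fst c r hc, spN_other_snd c r hc, join_eq_joinTail]
      rw [join_eq_joinTail] at ih
      simp [ih]

theorem pre_iff (c : Char) (r : List Char) :
    ['#', ' '].isPrefixOf (c :: (spN r).1) = true ↔ (c = '#' ∧ r.head? = some ' ') := by
  rw [show (r.head? = some ' ') ↔ ((spN r).1.head? = some ' ') from (spN_fst_head r).symm]
  cases hs : (spN r).1 with
  | nil => simp [List.isPrefixOf]
  | cons y ys =>
    rw [List.isPrefixOf_iff_prefix, List.cons_prefix_cons, List.cons_prefix_cons]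
    simp only [List.nil_prefix, and_true, List.head?_cons, Option.some.injEq]
    constructor
    · rintro ⟨rfl, rfl⟩; exact ⟨rfl, rfl⟩
    · rintro ⟨rfl, rfl⟩; exact ⟨rfl, rfl⟩

theorem main_scan (l : List Char) :
    fixAltGo l true = PySem.Chars.join ['\n'] (List.map fA ((spN l).1 :: (spN l).2))
    ∧ fixAltGo l false = PySem.Chars.join ['\n'] ((spN l).1 :: List.map fA (spN l).2) := by
  induction l with
  | nil =>
    constructor <;>
      simp [fixAltGo_nil, spN_nil, PySem.Chars.join_singleton, fA_nil]
  | cons c r ih =>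
    obtain ⟨ihT, ihF⟩ := ih
    constructor
    · -- atStart = true
      by_cases hc : c = '\n'
      · subst hc
        rw [fixAltGo_cons]
        have hcond : (true && '\n' == '#' && r.head? == some ' ') = false := by simp
        rw [hcond]
        simp only [Bool.false_eq_true, if_false]
        rw [spN_newline_fst, spN_newline_snd, List.map_cons, join_eq_joinTail, fA_nil,
          List.map_cons, joinTail_cons, ← List.map_cons]
        have : ('\n' == '\n') = true := by simp
        rw [this, ihT, List.nil_append]
      · have hflag : (c == '\n') = false := by simp [hc]
        rw [fixAltGo_cons, spN_other_fst c r hc, spN_other_snd c r hc, List.map_cons, fA_eq]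
        by_cases hins : c = '#' ∧ r.head? = some ' '
        · have hcond : (true && c == '#' && r.head? == some ' ') = true := by
            simp [hins.1, hins.2]
          rw [hcond, if_pos rfl, if_pos ((pre_iff c r).mpr hins)]
          rw [hflag, join_eq_joinTail]
          rw [join_eq_joinTail] at ihF
          rw [ihF]
          simp
        · have hcond : (true && c == '#' && r.head? == some ' ') = false := by
            rcases Decidable.not_and_iff_not_or_not.mp hins with h1 | h2
            · simp [h1]
            · simp [h2]
          rw [hcond]
          simp only [Bool.false_eq_true, if_false]
          rw [if_neg (by rw [pre_iff]; exact hins)]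
          rw [hflag, join_eq_joinTail]
          rw [join_eq_joinTail] at ihF
          rw [ihF]
          simp
    · -- atStart = false
      rw [fixAltGo_cons]
      have hcond : (false && c == '#' && r.head? == some ' ') = false := by simp
      rw [hcond]
      simp only [Bool.false_eq_true, if_false]
      by_cases hc : c = '\n'
      · subst hc
        rw [spN_newline_fst, spN_newline_snd, join_eq_joinTail, List.map_cons, joinTail_cons,
          ← List.map_cons]
        have : ('\n' == '\n') = true := by simp
        rw [this, ihT, List.nil_append]
      · have hflag : (c == '\n') = false := by simp [hc]
        rw [hflag, spN_other_fst c r hc, spN_other_snd c r hc, join_eq_joinTail]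
        rw [join_eq_joinTail] at ihF
        rw [ihF]
        simp

-- ===== VERDICT (by name: the statement is the Claim_ definition above) =====
theorem fix_headings_spec : Claim_equal_fix_headings := by
  intro content is_first_file _
  unfold Spec_fix_headings fix_headings fix_headings_alt
  cases is_first_file with
  | true =>
    simp only [Bool.not_true, Bool.false_and, Bool.false_eq_true, if_false, if_true]
    rw [splitOn_eq, PySem.List.foldl_append_singleton_eq_self, List.nil_append, join_identity]
    simp
  | false =>
    simp only [Bool.not_false, Bool.true_and, Bool.false_eq_true, if_false]
    rw [splitOn_eq]
    rw [show (List.foldl (fun acc line =>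
        acc ++ [if PySem.Chars.startswith line ['#', ' ']
                then ['#', '#', ' '] ++ PySem.Chars.slice line (some 2) none
                else line]) [] ((spN content.toList).1 :: (spN content.toList).2))
      = List.map fA ((spN content.toList).1 :: (spN content.toList).2) from by
        simpa [fA] using PySem.List.foldl_append_singleton_eq_map fA
          ((spN content.toList).1 :: (spN content.toList).2) []]
    rw [← (main_scan content.toList).1]
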